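-- pv_equiv track=rewrite | github.com/ratati12/seti | Курсовая работа Матяша А.А. ККСО-01-19/src/nrz.py | get_x_coordinates_for_encoding
-- ===== SOURCE A (Python) =====
-- def get_x_coordinates_for_encoding(length):
--     sequence = []
--     step = 0
--     sequence.append(step)
--     for i in range(1, length, 4):
--         sequence.append(step)
--         step += 1
--         sequence.append(step)
--         sequence.append(step)
--         step += 1
--         sequence.append(step)
--     return sequence
-- ===== SOURCE B (Python) =====
-- def get_x_coordinates_for_encoding(length):
--     n = 1 + 4 * max(0, (length + 2) // 4)
--     return [i // 2 for i in range(n)]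
-- ===== Notes on version B (the rewrite author's own statement) =====
-- stated objective: simpler
-- what changed: Replaces the stateful loop (a maintained step accumulator appending four elements per iteration of the stride-four range) by a closed-form element count and a direct per-index halving formula.
import Mathlib
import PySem

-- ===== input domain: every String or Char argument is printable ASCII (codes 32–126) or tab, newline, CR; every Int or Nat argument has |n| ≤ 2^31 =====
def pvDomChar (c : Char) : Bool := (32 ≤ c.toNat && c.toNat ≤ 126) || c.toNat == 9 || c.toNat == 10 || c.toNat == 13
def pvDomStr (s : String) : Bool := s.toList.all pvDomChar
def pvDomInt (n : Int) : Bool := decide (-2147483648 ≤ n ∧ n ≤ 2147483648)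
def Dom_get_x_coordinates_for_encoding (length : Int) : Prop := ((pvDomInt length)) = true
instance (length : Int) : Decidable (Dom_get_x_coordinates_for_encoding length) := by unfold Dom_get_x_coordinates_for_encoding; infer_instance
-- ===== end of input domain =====

-- B replaces A's step-accumulator loop by a closed-form element count and a per-index i//2 formula (objective: simpler).

-- ===== PORT A =====
def get_x_coordinates_for_encoding (length : Int) : List Int :=
  let sequence : List Int := []
  let step : Int := 0
  let sequence := sequence ++ [step]
  let r := (PySem.List.pyRange 1 length 4).foldl
    (fun (st : List Int × Int) _ =>
      let sequence := st.1
      let step := st.2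
      let sequence := sequence ++ [step]
      let step := step + 1
      let sequence := sequence ++ [step]
      let sequence := sequence ++ [step]
      let step := step + 1
      let sequence := sequence ++ [step]
      (sequence, step)) (sequence, step)
  r.1

-- ===== PORT B =====
def get_x_coordinates_for_encoding_alt (length : Int) : List Int :=
  let n : Int := 1 + 4 * max 0 (PySem.Int.floordiv (length + 2) 4)
  (PySem.List.pyRange 0 n 1).map (fun i => PySem.Int.floordiv i 2)

-- ===== PRECONDITION & SPEC =====
def Spec_get_x_coordinates_for_encoding (length : Int) (out : List Int) : Prop := out = get_x_coordinates_for_encoding_alt length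
instance (length : Int) (out : List Int) : Decidable (Spec_get_x_coordinates_for_encoding length out) := by unfold Spec_get_x_coordinates_for_encoding; infer_instance

-- ===== CLAIM (what is proved, stated in full; the proofs are below) =====
def Claim_equal_get_x_coordinates_for_encoding : Prop := ∀ (length : Int), Dom_get_x_coordinates_for_encoding length → Spec_get_x_coordinates_for_encoding length (get_x_coordinates_for_encoding length)

-- ===== LEMMAS AND PROOFS =====

-- the staircase prefix of length 1+4m, as Nat indices mapped to i//2
def pvStair (m : Nat) : List Int := (List.range (1 + 4 * m)).map (fun i => ((i / 2 : Nat) : Int))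

lemma pvStair_succ (m : Nat) :
    pvStair (m + 1) = pvStair m ++ [(2 * m : Int), 2 * m + 1, 2 * m + 1, 2 * m + 2] := by
  unfold pvStair
  have h : 1 + 4 * (m + 1) = (1 + 4 * m) + 4 := by ring
  rw [h, List.range_add, List.map_append]
  congr 1
  have hr : List.range 4 = [0, 1, 2, 3] := by decide
  rw [hr]
  simp only [List.map_cons, List.map_nil]
  have e0 : (1 + 4 * m + 0) / 2 = 2 * m := by omega
  have e1 : (1 + 4 * m + 1) / 2 = 2 * m + 1 := by omega
  have e2 : (1 + 4 * m + 2) / 2 = 2 * m + 1 := by omega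
  have e3 : (1 + 4 * m + 3) / 2 = 2 * m + 2 := by omega
  rw [e0, e1, e2, e3]
  push_cast
  ring_nf

-- A's fold ignores the list elements; its state after any prefix of length m' more iterations
lemma pvFold_loop (L : List Int) (m : Nat) :
    (L.foldl
      (fun (st : List Int × Int) _ =>
        (st.1 ++ [st.2] ++ [st.2 + 1] ++ [st.2 + 1] ++ [st.2 + 1 + 1], st.2 + 1 + 1))
      (pvStair m, 2 * (m : Int))) = (pvStair (m + L.length), 2 * ((m : Int) + L.length)) := by
  induction L generalizing m with
  | nil => simp
  | cons a t ih =>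
    simp only [List.foldl_cons]
    have hst : (pvStair m ++ [(2 * (m:Int))] ++ [2 * (m:Int) + 1] ++ [2 * (m:Int) + 1] ++ [2 * (m:Int) + 1 + 1],
        (2 * (m:Int)) + 1 + 1) = (pvStair (m + 1), 2 * ((m + 1 : Nat) : Int)) := by
      rw [pvStair_succ]
      simp only [Prod.mk.injEq]
      refine ⟨by simp; omega, by omega⟩
    rw [hst, ih (m + 1)]
    simp only [Prod.mk.injEq]
    refine ⟨by congr 1; simp [List.length_cons]; omega, by simp [List.length_cons]; omega⟩

lemma pvA_eq_stair (length : Int) :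
    get_x_coordinates_for_encoding length = pvStair (PySem.List.pyRange 1 length 4).length := by
  unfold get_x_coordinates_for_encoding
  have h0 : ([] : List Int) ++ [(0 : Int)] = pvStair 0 := by simp [pvStair]
  simp only [h0]
  have h := pvFold_loop (PySem.List.pyRange 1 length 4) 0
  simp only [Nat.cast_zero, mul_zero, zero_add] at h
  rw [h]

lemma pvB_eq_stair (length : Int) :
    get_x_coordinates_for_encoding_alt length = pvStair (PySem.List.pyRange 1 length 4).length := by
  simp only [get_x_coordinates_for_encoding_alt, pvStair]
  have hk : (PySem.List.pyRange 1 length 4).length =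
      (if 1 < length then ((length - 1 + 4 - 1) / 4).toNat else 0) := by
    rw [PySem.List.pyRange_of_pos 1 length (by norm_num)]
    simp only [List.length_map, List.length_range]
  set K : Nat := (if 1 < length then ((length - 1 + 4 - 1) / 4).toNat else 0) with hK
  have hfd : PySem.Int.floordiv (length + 2) 4 = (length + 2) / 4 :=
    PySem.Int.floordiv_eq_ediv_of_pos (by norm_num)
  have hn : (1 : Int) + 4 * max 0 (PySem.Int.floordiv (length + 2) 4) = ((1 + 4 * K : Nat) : Int) := by
    rw [hfd, hK]
    split_ifs with h
    · push_cast
      have h1 : (0 : Int) ≤ (length + 2) / 4 := by omega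
      have h2 : max (0:Int) ((length + 2) / 4) = (length + 2) / 4 := by omega
      have h3 : length - 1 + 4 - 1 = length + 2 := by ring
      rw [h2, h3]
      omega
    · have h2 : max (0:Int) ((length + 2) / 4) = 0 := by
        have : (length + 2) / 4 ≤ 0 := by omega
        omega
      simp [h2]
  simp only [hn, PySem.List.pyRange_zero_natCast, List.map_map, hk]
  apply List.map_congr_left
  intro i hi
  simp only [Function.comp]
  rw [PySem.Int.floordiv_eq_ediv_of_pos (by norm_num)]
  omega

-- ===== VERDICT (by name: the statement is the Claim_ definition above) =====
theorem get_x_coordinates_for_encoding_spec : Claim_equal_get_x_coordinates_for_encoding := by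
  intro length _
  unfold Spec_get_x_coordinates_for_encoding
  rw [pvA_eq_stair, pvB_eq_stair]
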